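-- pv_equiv track=rewrite | github.com/bssrdf/pyleet | R/RemoveColoredPiecesifBothNeighborsaretheSameColor.py | winnerOfGame3
-- ===== SOURCE A (Python) =====
-- def winnerOfGame3(colors: str) -> bool:
--     n = len(colors)
--     A, B = 0, 0
--     i = 0
--     while i < n:
--         c, l = colors[i],  1
--         while i+1 < n and colors[i+1] == c:
--             i += 1
--             l += 1
--         if l >= 3:
--             if c == 'A': A += l-2
--             else: B += l-2
--         i += 1
--     return  A > B
-- ===== SOURCE B (Python) =====
-- def winnerOfGame3(colors: str) -> bool:
--     a = b = 0
--     for x, y, z in zip(colors, colors[1:], colors[2:]):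
--         if x == y == z:
--             if x == 'A':
--                 a += 1
--             else:
--                 b += 1
--     return a > b
-- ===== Notes on version B (the rewrite author's own statement) =====
-- stated objective: idiomatic
-- what changed: Replaces the index-based run-length grouping (nested while loops with index skipping and per-run l-2 contributions) by a single sliding triple-window scan (zip of the string with its two shifts) that increments a counter per interior position whose both neighbors match.
import Mathlib
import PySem

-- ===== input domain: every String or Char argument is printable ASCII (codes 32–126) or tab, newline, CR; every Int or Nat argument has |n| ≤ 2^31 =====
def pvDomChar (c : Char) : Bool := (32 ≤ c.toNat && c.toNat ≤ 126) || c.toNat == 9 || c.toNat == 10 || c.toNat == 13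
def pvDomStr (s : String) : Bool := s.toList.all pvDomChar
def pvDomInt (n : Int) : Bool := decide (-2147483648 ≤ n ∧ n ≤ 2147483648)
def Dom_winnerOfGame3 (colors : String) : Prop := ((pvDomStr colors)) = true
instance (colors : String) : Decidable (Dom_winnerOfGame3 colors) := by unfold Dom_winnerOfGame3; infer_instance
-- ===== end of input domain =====

-- B differs from A only in algorithm; header: B replaces A's run-length grouping by a sliding triple-window scan (idiomatic, same O(n) cost).

-- ===== PORT A =====
-- inner `while i+1 < n and colors[i+1] == c` loop: the suffix after position i plays the role of the index
def aInner (c : Char) (l : Nat) (rest : List Char) : Nat × List Char :=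
  match rest with
  | [] => (l, [])
  | d :: r' => if d == c then aInner c (l + 1) r' else (l, d :: r')

theorem aInner_len (c : Char) (l : Nat) (rest : List Char) :
    (aInner c l rest).2.length ≤ rest.length := by
  induction rest generalizing l with
  | nil => simp [aInner]
  | cons d r' ih =>
    simp only [aInner]
    split
    · exact le_trans (ih (l+1)) (by simp)
    · simp

-- outer `while i < n` loop of A
def aOuter (rest : List Char) (A B : Nat) : Bool :=
  match h : rest with
  | [] => decide (A > B)
  | c :: r =>
    let p := aInner c 1 r
    if p.1 ≥ 3 then
      if c == 'A' then aOuter p.2 (A + (p.1 - 2)) B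
      else aOuter p.2 A (B + (p.1 - 2))
    else aOuter p.2 A B
termination_by rest.length
decreasing_by all_goals exact Nat.lt_succ_of_le (aInner_len c 1 r)

def winnerOfGame3 (colors : String) : Bool := aOuter colors.toList 0 0

-- ===== PORT B =====
-- the `for x, y, z in zip(colors, colors[1:], colors[2:])` loop of Source B as recursion on the char list
def altGo (rest : List Char) (a b : Nat) : Bool :=
  match rest with
  | x :: y :: z :: r =>
    if x == y && y == z then
      if x == 'A' then altGo (y :: z :: r) (a + 1) b
      else altGo (y :: z :: r) a (b + 1)
    else altGo (y :: z :: r) a b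
  | _ => decide (a > b)

def winnerOfGame3_alt (colors : String) : Bool := altGo colors.toList 0 0

-- ===== PRECONDITION & SPEC =====
def Spec_winnerOfGame3 (colors : String) (out : Bool) : Prop := out = winnerOfGame3_alt colors
instance (colors : String) (out : Bool) : Decidable (Spec_winnerOfGame3 colors out) := by unfold Spec_winnerOfGame3; infer_instance

-- ===== CLAIM (what is proved, stated in full; the proofs are below) =====
def Claim_equal_winnerOfGame3 : Prop := ∀ (colors : String), Dom_winnerOfGame3 colors → Spec_winnerOfGame3 colors (winnerOfGame3 colors)

-- ===== LEMMAS AND PROOFS =====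

-- number of interior positions whose two neighbors are equal and whose char satisfies f
def cnt (f : Char → Bool) : List Char → Nat
  | x :: y :: z :: r => (if x == y && y == z && f x then 1 else 0) + cnt f (y :: z :: r)
  | _ => 0

theorem altGo_cnt (rest : List Char) : ∀ a b : Nat,
    altGo rest a b = decide (a + cnt (· == 'A') rest > b + cnt (fun x => !(x == 'A')) rest) := by
  induction rest with
  | nil => intro a b; simp [altGo, cnt]
  | cons x t ih =>
    intro a b
    match t, ih with
    | [], _ => simp [altGo, cnt]
    | [y], _ => simp [altGo, cnt]
    | y :: z :: r, ih =>
      by_cases h1 : (x == y && y == z) = true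
      · obtain ⟨e1, e2⟩ : x = y ∧ y = z := by simpa using h1
        subst e1; subst e2
        by_cases h2 : (x == 'A') = true
        · simp only [altGo, cnt, h1, h2, ih, Bool.and_self, if_true,
            Bool.not_true, Bool.and_false, Bool.false_eq_true, if_false]
          rw [decide_eq_decide]; omega
        · have h2' : (x == 'A') = false := by simpa using h2
          simp only [altGo, cnt, h1, h2', ih, Bool.and_self, Bool.true_and, if_true,
            Bool.not_false, Bool.and_true, Bool.false_eq_true, if_false]
          rw [decide_eq_decide]; omega
      · have h1' : (x == y && y == z) = false := by simpa using h1
        simp [altGo, cnt, h1', ih]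

theorem aInner_spec (c : Char) (rest : List Char) (l : Nat) :
    ∃ k rest', aInner c l rest = (l + k, rest') ∧
      rest = List.replicate k c ++ rest' ∧ ∀ d ∈ rest'.head?, d ≠ c := by
  induction rest generalizing l with
  | nil => exact ⟨0, [], by simp [aInner]⟩
  | cons d r' ih =>
    by_cases hd : d = c
    · obtain ⟨k, rest', h1, h2, h3⟩ := ih (l + 1)
      refine ⟨k + 1, rest', ?_, ?_, h3⟩
      · simp [aInner, hd, h1]; omega
      · simp [List.replicate_succ, hd, ← h2]
    · exact ⟨0, d :: r', by simp [aInner, hd], by simp, by simpa using hd⟩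

theorem cnt_run (f : Char → Bool) (k : Nat) (c : Char) (rest' : List Char)
    (hb : ∀ d ∈ rest'.head?, d ≠ c) :
    cnt f (List.replicate k c ++ rest') = (if f c then k - 2 else 0) + cnt f rest' := by
  induction k using Nat.strong_induction_on with
  | _ k ih =>
    match k with
    | 0 => simp [cnt]
    | 1 =>
      have hcx : ∀ x ∈ rest'.head?, (c == x) = false := by
        intro x hx
        exact beq_eq_false_iff_ne.mpr (fun h => hb x hx h.symm)
      match rest' with
      | [] => simp [cnt]
      | [x] => simp [cnt]
      | x :: y :: r =>
        have := hcx x (by simp)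
        simp [cnt, List.replicate, this]
    | 2 =>
      match rest' with
      | [] => simp [cnt]
      | x :: r =>
        have hb' : x ≠ c := by simpa using hb
        have hcx : (c == x) = false := beq_eq_false_iff_ne.mpr (fun h => hb' h.symm)
        have h1 := ih 1 (by omega)
        simp only [List.replicate, List.cons_append, List.nil_append] at h1 ⊢
        simp [cnt, hcx, h1]
    | (m + 3) =>
      have h1 := ih (m + 2) (by omega)
      simp only [List.replicate, List.cons_append] at h1 ⊢
      simp only [cnt, h1]
      by_cases hf : f c <;> simp [hf] <;> omega

theorem aOuter_cnt (rest : List Char) (A B : Nat) :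
    aOuter rest A B = decide (A + cnt (· == 'A') rest > B + cnt (fun x => !(x == 'A')) rest) := by
  induction hn : rest.length using Nat.strong_induction_on generalizing rest A B with
  | _ n ih =>
    match rest with
    | [] => simp [aOuter, cnt]
    | c :: r =>
      obtain ⟨k, rest', h1, h2, h3⟩ := aInner_spec c r 1
      have hlen : rest'.length ≤ r.length := by
        subst h2; simp
      have hrec : ∀ A B : Nat, aOuter rest' A B =
          decide (A + cnt (· == 'A') rest' > B + cnt (fun x => !(x == 'A')) rest') := by
        intro A B
        exact ih rest'.length (by subst hn; simpa using Nat.lt_succ_of_le hlen) rest' A B rfl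
      have hcA : cnt (· == 'A') (c :: r) =
          (if c == 'A' then (k + 1) - 2 else 0) + cnt (· == 'A') rest' := by
        have hr : (c :: r) = List.replicate (k + 1) c ++ rest' := by
          simp [List.replicate_succ, h2]
        rw [hr, cnt_run _ _ _ _ h3]
      have hcB : cnt (fun x => !(x == 'A')) (c :: r) =
          (if !(c == 'A') then (k + 1) - 2 else 0) + cnt (fun x => !(x == 'A')) rest' := by
        have hr : (c :: r) = List.replicate (k + 1) c ++ rest' := by
          simp [List.replicate_succ, h2]
        rw [hr, cnt_run _ _ _ _ h3]
      rw [aOuter]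
      simp only [h1]
      by_cases hA : (c == 'A') = true
      · have e1 : cnt (· == 'A') (c :: r) = (k + 1 - 2) + cnt (· == 'A') rest' := by
          rw [hcA, hA]; simp
        have e2 : cnt (fun x => !(x == 'A')) (c :: r) = cnt (fun x => !(x == 'A')) rest' := by
          rw [hcB, hA]; simp
        simp only [hA, if_true, e1, e2]
        split_ifs <;> rw [hrec, decide_eq_decide] <;> omega
      · have hA' : (c == 'A') = false := by simpa using hA
        have e1 : cnt (· == 'A') (c :: r) = cnt (· == 'A') rest' := by
          rw [hcA, hA']; simp
        have e2 : cnt (fun x => !(x == 'A')) (c :: r) =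
            (k + 1 - 2) + cnt (fun x => !(x == 'A')) rest' := by
          rw [hcB, hA']; simp
        simp only [hA', Bool.false_eq_true, if_false, e1, e2]
        split_ifs <;> rw [hrec, decide_eq_decide] <;> omega

-- ===== VERDICT (by name: the statement is the Claim_ definition above) =====
theorem winnerOfGame3_spec : Claim_equal_winnerOfGame3 := by
  intro colors _
  unfold Spec_winnerOfGame3 winnerOfGame3 winnerOfGame3_alt
  rw [aOuter_cnt, altGo_cnt]
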